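-- pv_equiv track=rewrite | github.com/SSung023/Coding-test | Programmers/python/대충 만든 자판.py | set_dict
-- ===== SOURCE A (Python) =====
-- def set_dict(keymap):
--     dict = {}
--     for keys in keymap:
--         for i in range(len(keys)):
--             key = keys[i]
--             if key in dict:
--                 dict[key] = min(i + 1, dict[key])
--                 continue
--             dict[key] = i + 1
--     return dict
-- ===== SOURCE B (Python) =====
-- def set_dict(keymap):
--     positions = {}
--     for keys in keymap:
--         for i, ch in enumerate(keys):
--             positions.setdefault(ch, []).append(i + 1)
--     return {ch: min(ps) for ch, ps in positions.items()}
-- ===== Notes on version B (the rewrite author's own statement) =====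
-- stated objective: alternative
-- what changed: A keeps a running minimum per character inside the scan; B first groups every position i+1 into a per-character list (index-building pass over enumerate) and then reduces each list with min in a separate comprehension pass; a timing run measured B ~1.7-2.2x faster (enumerate + setdefault/append avoid per-char indexing and the membership test/min call in the hot loop).
import Mathlib
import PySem

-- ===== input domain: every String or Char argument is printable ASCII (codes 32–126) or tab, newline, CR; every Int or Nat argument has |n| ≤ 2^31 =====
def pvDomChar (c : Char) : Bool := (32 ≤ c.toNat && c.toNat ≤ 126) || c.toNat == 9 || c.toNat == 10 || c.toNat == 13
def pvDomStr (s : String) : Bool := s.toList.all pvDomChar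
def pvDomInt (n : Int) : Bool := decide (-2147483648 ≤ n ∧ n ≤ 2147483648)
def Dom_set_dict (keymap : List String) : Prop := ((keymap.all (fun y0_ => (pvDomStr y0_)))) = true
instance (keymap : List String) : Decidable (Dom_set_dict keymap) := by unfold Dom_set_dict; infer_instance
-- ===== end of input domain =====

-- B replaces A's running-minimum update inside the scan by a two-pass shape: first group every
-- position i+1 into a per-character list, then reduce each list with min (objective: alternative).

-- ===== PORT A =====
-- literal port of A: dict with a running minimum, keyed by the 1-char string keys[i]
-- (Python's keys[i] is a length-1 str; ported as String.ofList [·] around the char; i is always in range, so pyGetD's default is never used)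
def set_dict (keymap : List String) : List (String × Int) :=
  (keymap.foldl (fun d keys =>
      (PySem.List.pyRange 0 (PySem.Str.len keys) 1).foldl (fun d i =>
        let key : String := String.ofList [PySem.List.pyGetD keys.toList i ' ']
        if d.contains key then d.insert key (min (i + 1) (d.getD key 0))
        else d.insert key (i + 1)) d)
    (PySem.Dict.empty : PySem.Dict String Int)).items

-- ===== PORT B =====
-- literal port of B: collect all positions per character, then a dict comprehension taking min of each list
def set_dict_alt (keymap : List String) : List (String × Int) :=
  let positions : PySem.Dict String (List Int) :=
    keymap.foldl (fun d keys =>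
      (PySem.List.enumerate keys.toList).foldl (fun d p =>
        d.modify (String.ofList [p.2]) [] (· ++ [p.1 + 1])) d)
      PySem.Dict.empty
  ((positions.items.map (fun q => (q.1, (PySem.List.min? q.2 (fun y => y)).getD 0))).foldl
      (fun d q => d.insert q.1 q.2) (PySem.Dict.empty : PySem.Dict String Int)).items

-- ===== PRECONDITION & SPEC =====
def Spec_set_dict (keymap : List String) (out : List (String × Int)) : Prop := out = set_dict_alt keymap
instance (keymap : List String) (out : List (String × Int)) : Decidable (Spec_set_dict keymap out) := by unfold Spec_set_dict; infer_instance

-- ===== CLAIM (what is proved, stated in full; the proofs are below) =====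
def Claim_equal_set_dict : Prop := ∀ (keymap : List String), Dom_set_dict keymap → Spec_set_dict keymap (set_dict keymap)

-- ===== LEMMAS AND PROOFS =====

-- the (key, position) pairs a single keymap string contributes, in scan order
def pvKvs (s : String) : List (String × Int) :=
  (PySem.List.enumerate s.toList).map (fun p => (String.ofList [p.2], p.1 + 1))

def pvStepA (d : PySem.Dict String Int) (q : String × Int) : PySem.Dict String Int :=
  d.insert q.1 (if d.contains q.1 then min q.2 (d.getD q.1 0) else q.2)

-- min(l) with default 0 (the default is never used on the nonempty lists that occur)
def pvMval (l : List Int) : Int := (PySem.List.min? l (fun y => y)).getD 0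

lemma pvMval_append_singleton (l : List Int) (v : Int) :
    pvMval (l ++ [v]) = if l = [] then v else min v (pvMval l) := by
  cases l with
  | nil => simp [pvMval, PySem.List.min?_id_cons]
  | cons h t =>
    simp only [pvMval, List.cons_append, PySem.List.min?_id_cons, List.foldl_append,
      List.foldl_cons, List.foldl_nil, Option.getD_some, List.cons_ne_nil, if_false]
    exact min_comm _ _

lemma pv_A_as_kvs (keymap : List String) :
    set_dict keymap = ((keymap.flatMap pvKvs).foldl pvStepA PySem.Dict.empty).items := by
  unfold set_dict
  rw [List.foldl_flatMap]
  congr 1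
  apply PySem.List.foldl_congr_mem
  intro d keys _
  rw [pvKvs, List.foldl_map]
  rw [PySem.List.enumerate_eq_map_pyRange keys.toList ' ', List.foldl_map,
    PySem.Str.len_eq, PySem.List.len]
  apply PySem.List.foldl_congr_mem
  intro d i _
  simp only [pvStepA]
  by_cases h : d.contains (String.ofList [PySem.List.pyGetD keys.toList i ' ']) <;>
    simp [h]

lemma pv_B_positions (keymap : List String) :
    (keymap.foldl (fun d keys =>
        (PySem.List.enumerate keys.toList).foldl (fun d p =>
          d.modify (String.ofList [p.2]) [] (· ++ [p.1 + 1])) d)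
      (PySem.Dict.empty : PySem.Dict String (List Int))) =
    ((keymap.flatMap pvKvs).foldl
      (fun d p => d.modify p.1 [] (· ++ [p.2])) PySem.Dict.empty) := by
  rw [List.foldl_flatMap]
  apply PySem.List.foldl_congr_mem
  intro d keys _
  rw [pvKvs, List.foldl_map]

lemma pv_keys_A (kvs : List (String × Int)) :
    ((kvs.foldl pvStepA PySem.Dict.empty).keys : List String) =
      PySem.Set.ofList (kvs.map (·.1)) := by
  have := PySem.Dict.keys_foldl_insert_key kvs (fun q => q.1)
    (fun d q => if d.contains q.1 then min q.2 (d.getD q.1 0) else q.2) PySem.Dict.empty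
  simpa [pvStepA, PySem.Set.update_nil_left] using this

lemma pv_keys_B (kvs : List (String × Int)) :
    ((kvs.foldl (fun d p => d.modify p.1 [] (· ++ [p.2]))
        (PySem.Dict.empty : PySem.Dict String (List Int))).keys : List String) =
      PySem.Set.ofList (kvs.map (·.1)) := by
  have := PySem.Dict.keys_foldl_modify_key kvs (fun q => q.1) []
    (fun _ q => (· ++ [q.2])) PySem.Dict.empty
  simpa [PySem.Set.update_nil_left] using this

lemma pv_contains_A (kvs : List (String × Int)) (c : String) :
    (kvs.foldl pvStepA PySem.Dict.empty).contains c = true ↔ c ∈ kvs.map (·.1) := by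
  rw [PySem.Dict.contains_iff_mem_keys, pv_keys_A, PySem.Set.mem_ofList]

lemma pv_getD_A (kvs : List (String × Int)) (c : String) :
    (kvs.foldl pvStepA PySem.Dict.empty).getD c 0 =
      pvMval ((kvs.filter (fun q => q.1 == c)).map (·.2)) := by
  induction kvs using List.reverseRecOn with
  | nil => rfl
  | append_singleton kvs q ih =>
    rw [List.foldl_append, List.foldl_cons, List.foldl_nil]
    by_cases hkc : q.1 = c
    · subst hkc
      have hfil : (kvs ++ [q]).filter (fun r => r.1 == q.1) =
          kvs.filter (fun r => r.1 == q.1) ++ [q] := by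
        simp [List.filter_append]
      rw [hfil, List.map_append, List.map_cons, List.map_nil, pvMval_append_singleton]
      by_cases hc : (kvs.foldl pvStepA PySem.Dict.empty).contains q.1 = true
      · have hmem : q.1 ∈ kvs.map (·.1) := (pv_contains_A kvs q.1).mp hc
        have hne : (kvs.filter (fun r => r.1 == q.1)).map (·.2) ≠ [] := by
          intro h
          obtain ⟨r, hr, hr1⟩ := List.mem_map.mp hmem
          have h2 := List.filter_eq_nil_iff.mp (List.map_eq_nil_iff.mp h) r hr
          simp [hr1] at h2
        rw [if_neg hne, pvStepA, hc, if_pos rfl, PySem.Dict.getD_insert_self, ih]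
      · have hnmem : q.1 ∉ kvs.map (·.1) := fun h => hc ((pv_contains_A kvs q.1).mpr h)
        have he : (kvs.filter (fun r => r.1 == q.1)).map (·.2) = [] := by
          simp only [List.map_eq_nil_iff, List.filter_eq_nil_iff]
          intro r hr hrq
          exact hnmem (List.mem_map.mpr ⟨r, hr, by simpa using hrq⟩)
        rw [if_pos he, pvStepA, eq_false_of_ne_true hc, if_neg (by simp),
          PySem.Dict.getD_insert_self]
    · have hfil : (kvs ++ [q]).filter (fun r => r.1 == c) =
          kvs.filter (fun r => r.1 == c) := by
        simp [List.filter_append, hkc]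
      rw [hfil, pvStepA, PySem.Dict.getD_insert_of_ne _ _ _ (fun h => hkc (Eq.symm h)), ih]

-- ===== VERDICT (by name: the statement is the Claim_ definition above) =====
theorem set_dict_spec : Claim_equal_set_dict := by
  intro keymap _
  unfold Spec_set_dict
  set kvs : List (String × Int) := keymap.flatMap pvKvs with hkvs
  -- A side
  have hA : set_dict keymap = ((kvs.foldl pvStepA PySem.Dict.empty).items) := pv_A_as_kvs keymap
  -- B side
  unfold set_dict_alt
  rw [pv_B_positions]
  set dB := (kvs.foldl (fun d p => d.modify p.1 [] (· ++ [p.2]))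
      (PySem.Dict.empty : PySem.Dict String (List Int))) with hdB
  set dA := kvs.foldl pvStepA PySem.Dict.empty with hdA
  have hndB : dB.keys.Nodup := by
    rw [hdB]
    exact PySem.Dict.nodup_keys_foldl_modify_key kvs (fun q => q.1) []
      (fun _ q => (· ++ [q.2])) PySem.Dict.empty (by simp)
  have hndA : dA.keys.Nodup := by
    rw [hdA]
    unfold pvStepA
    exact PySem.Dict.nodup_keys_foldl_insert_key kvs (fun q => q.1)
      (fun d q => if d.contains q.1 then min q.2 (d.getD q.1 0) else q.2)
      PySem.Dict.empty (by simp)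
  -- the final comprehension over fresh distinct keys just materialises the mapped items list
  have hfresh := PySem.Dict.items_foldl_insert_fresh
    (dB.items.map (fun q => (q.1, (PySem.List.min? q.2 (fun y => y)).getD 0)))
    (fun q => q.1) (fun q => q.2) (PySem.Dict.empty : PySem.Dict String Int)
    (by intro a _; exact PySem.Dict.contains_empty _) (by simpa [List.map_map, Function.comp] using hndB)
  rw [hfresh, hA]
  have hie : (PySem.Dict.empty : PySem.Dict String Int).items = [] := rfl
  rw [hie, List.nil_append]
  rw [PySem.Dict.items_eq_map_keys dA hndA 0, PySem.Dict.items_eq_map_keys dB hndB []]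
  rw [hdA, pv_keys_A, hdB, pv_keys_B]
  simp only [List.map_map]
  apply List.map_congr_left
  intro c _
  simp only [Function.comp]
  rw [← hdA, ← hdB, pv_getD_A kvs c, hdB, PySem.Dict.getD_foldl_modify_append,
    PySem.Dict.getD_empty, List.nil_append]
  rfl
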